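-- pv_equiv track=rewrite | github.com/stevenhgs/code_voor_thesis | experimentsV2/helpers/get_order_score.py | get_follows_examples
-- ===== SOURCE A (Python) =====
-- def get_follows_examples(order):
--     examples = set()
--     for i in range(len(order) - 1):
--         base_group = order[i]
--         for j in range(i+1, len(order)):
--             other_group = order[j]
--             for element1 in base_group:
--                 for element2 in other_group:
--                     examples.add((element2, element1))
--     return examples
-- ===== SOURCE B (Python) =====
-- def get_follows_examples(order):
--     acc = set()
--     later = []
--     for head in reversed(order):
--         acc = {(e2, e1) for g in later for e1 in head for e2 in g} | acc
--         later = [head] + later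
--     return acc
-- ===== Notes on version B (the rewrite author's own statement) =====
-- stated objective: alternative
-- what changed: Replaces A's nested iteration over all index pairs i<j by a single backward sweep over the groups that threads the list of later groups as an accumulator, unioning each group's block of (later-element, earlier-element) pairs into the running set.
import Mathlib
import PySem

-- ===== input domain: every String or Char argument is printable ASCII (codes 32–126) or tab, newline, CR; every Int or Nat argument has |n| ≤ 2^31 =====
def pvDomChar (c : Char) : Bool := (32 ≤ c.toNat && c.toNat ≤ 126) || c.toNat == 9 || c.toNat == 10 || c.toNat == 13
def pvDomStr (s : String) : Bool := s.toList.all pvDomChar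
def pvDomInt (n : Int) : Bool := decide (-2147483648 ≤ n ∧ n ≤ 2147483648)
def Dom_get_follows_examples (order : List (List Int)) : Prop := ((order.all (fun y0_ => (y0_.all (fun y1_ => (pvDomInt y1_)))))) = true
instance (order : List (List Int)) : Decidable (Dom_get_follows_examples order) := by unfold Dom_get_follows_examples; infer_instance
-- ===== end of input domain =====

-- B replaces A's nested loop over all index pairs i < j by one backward sweep that threads
-- the list of later groups as an accumulator (objective: alternative decomposition, same cost).

-- ===== PORT A =====
-- literal transliteration of A: for i in range(len(order)-1): for j in range(i+1, len(order)):
--   for element1 in order[i]: for element2 in order[j]: examples.add((element2, element1))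
def get_follows_examples (order : List (List Int)) : List (Int × Int) :=
  (PySem.List.pyRange 0 (PySem.List.len order - 1)).foldl
    (fun examples i =>
      let base_group := PySem.List.pyGetD order i []
      (PySem.List.pyRange (i + 1) (PySem.List.len order)).foldl
        (fun examples j =>
          let other_group := PySem.List.pyGetD order j []
          base_group.foldl
            (fun examples element1 =>
              other_group.foldl
                (fun examples element2 => PySem.Set.add examples (element2, element1))
                examples)
            examples)
        examples)
    PySem.Set.empty

-- ===== PORT B =====
-- literal transliteration of Source B: acc = set(); later = [];
-- for head in reversed(order): acc = {(e2,e1) for g in later for e1 in head for e2 in g} | acc; later = [head] + later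
def get_follows_examples_alt (order : List (List Int)) : List (Int × Int) :=
  (order.reverse.foldl
    (fun st head =>
      (PySem.Set.union
         (PySem.Set.ofList
           (st.2.flatMap (fun g => head.flatMap (fun e1 => g.map (fun e2 => (e2, e1))))))
         st.1,
       head :: st.2))
    (PySem.Set.empty, ([] : List (List Int)))).1

-- ===== PRECONDITION & SPEC =====
def Spec_get_follows_examples (order : List (List Int)) (out : List (Int × Int)) : Prop := out = get_follows_examples_alt order
instance (order : List (List Int)) (out : List (Int × Int)) : Decidable (Spec_get_follows_examples order out) := by unfold Spec_get_follows_examples; infer_instance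

-- ===== CLAIM (what is proved, stated in full; the proofs are below) =====
def Claim_equal_get_follows_examples : Prop := ∀ (order : List (List Int)), Dom_get_follows_examples order → Spec_get_follows_examples order (get_follows_examples order)

-- ===== LEMMAS AND PROOFS =====

-- the sequence of pairs A generates for base group h against the later groups t, in generation order
def pvBlock (h : List Int) (t : List (List Int)) : List (Int × Int) :=
  t.flatMap (fun g => h.flatMap (fun e1 => g.map (fun e2 => (e2, e1))))

-- the full generation sequence of A (i-major, then j, then element1, then element2)
def pvGen : List (List Int) → List (Int × Int)
  | [] => []
  | h :: t => pvBlock h t ++ pvGen t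

theorem pv_getD_cons_succ {α : Type} (x : α) (xs : List α) (i : Int) (d : α) (hi : 0 ≤ i) :
    PySem.List.pyGetD (x :: xs) (i + 1) d = PySem.List.pyGetD xs i d := by
  rw [PySem.List.pyGetD_of_nonneg _ _ (by omega), PySem.List.pyGetD_of_nonneg _ _ hi]
  have : (i + 1).toNat = i.toNat + 1 := by omega
  simp [this]

theorem pv_foldl_pyRange_shift {β : Type} (a b : Int) (f : β → Int → β) (s : β) :
    (PySem.List.pyRange (a + 1) (b + 1)).foldl f s
      = (PySem.List.pyRange a b).foldl (fun acc i => f acc (i + 1)) s := by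
  rw [PySem.List.pyRange_one (a+1) (b+1), PySem.List.pyRange_one a b]
  have hba : (b + 1 - (a + 1)) = b - a := by ring
  rw [hba, List.foldl_map, List.foldl_map]
  exact PySem.List.foldl_congr_mem _ _ _ _ (by intro acc k _; congr 1; omega)

theorem pv_inner (h other : List Int) (ex : PySem.Set (Int × Int)) :
    h.foldl (fun ex e1 => other.foldl (fun ex e2 => PySem.Set.add ex (e2, e1)) ex) ex
      = PySem.Set.update ex (h.flatMap (fun e1 => other.map (fun e2 => (e2, e1)))) := by
  induction h generalizing ex with
  | nil => simp [PySem.Set.update_nil]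
  | cons e1 h ih =>
      simp only [List.foldl_cons, List.flatMap_cons, PySem.Set.update_append, ih,
        PySem.Set.update_map_eq_foldl_add]

theorem pv_blockfold (h : List Int) (t : List (List Int)) (ex : PySem.Set (Int × Int)) :
    t.foldl (fun ex other =>
        h.foldl (fun ex e1 => other.foldl (fun ex e2 => PySem.Set.add ex (e2, e1)) ex) ex) ex
      = PySem.Set.update ex (pvBlock h t) := by
  induction t generalizing ex with
  | nil => simp [pvBlock, PySem.Set.update_nil]
  | cons g t ih =>
      rw [List.foldl_cons, pv_inner, ih]
      simp [pvBlock, PySem.Set.update_append]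

theorem pv_A_loop (order : List (List Int)) (s : PySem.Set (Int × Int)) :
    (PySem.List.pyRange 0 (PySem.List.len order - 1)).foldl
      (fun examples i =>
        let base_group := PySem.List.pyGetD order i []
        (PySem.List.pyRange (i + 1) (PySem.List.len order)).foldl
          (fun examples j =>
            let other_group := PySem.List.pyGetD order j []
            base_group.foldl
              (fun examples element1 =>
                other_group.foldl
                  (fun examples element2 => PySem.Set.add examples (element2, element1))
                  examples)
              examples)
          examples)
      s = PySem.Set.update s (pvGen order) := by
  induction order generalizing s with
  | nil =>
      rw [PySem.List.pyRange_one_eq_nil (by simp [PySem.List.len])]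
      simp [pvGen, PySem.Set.update_nil]
  | cons h t ih =>
      by_cases ht : t = []
      · subst ht
        rw [PySem.List.pyRange_one_eq_nil (by simp [PySem.List.len])]
        simp [pvGen, pvBlock, PySem.Set.update_nil]
      · have htl : 0 < t.length := List.length_pos_iff.mpr ht
        have hlen : PySem.List.len (h :: t) - 1 = (t.length : Int) := by
          simp [PySem.List.len]
        rw [hlen, PySem.List.pyRange_one_cons (by exact_mod_cast htl), List.foldl_cons]
        have hget0 : PySem.List.pyGetD (h :: t) 0 ([] : List Int) = h := by
          rw [PySem.List.pyGetD_of_nonneg _ _ le_rfl]; rfl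
        simp only [hget0]
        have hlent : PySem.List.len t = (t.length : Int) := by simp [PySem.List.len]
        have hlc : PySem.List.len (h :: t) = PySem.List.len t + 1 := by
          simp [PySem.List.len]
        have h0 : List.foldl
            (fun examples j =>
              List.foldl
                (fun examples element1 =>
                  List.foldl (fun examples element2 => PySem.Set.add examples (element2, element1)) examples
                    (PySem.List.pyGetD (h :: t) j []))
                examples h)
            s (PySem.List.pyRange (0 + 1) (PySem.List.len (h :: t)))
            = PySem.Set.update s (pvBlock h t) := by
          rw [show (0 : Int) + 1 = 1 by norm_num]
          rw [PySem.List.foldl_pyRange_pyGetD (h :: t) ([] : List Int)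
              (fun examples other_group =>
                List.foldl
                  (fun examples element1 =>
                    List.foldl (fun examples element2 => PySem.Set.add examples (element2, element1)) examples
                      other_group)
                  examples h) s (by norm_num)]
          simpa using pv_blockfold h t s
        rw [h0]
        have hshift : PySem.List.pyRange (0 + 1) (t.length : Int)
            = PySem.List.pyRange (0 + 1) (((t.length : Int) - 1) + 1) := by norm_num
        rw [hshift, pv_foldl_pyRange_shift]
        have hcong : ∀ (acc : PySem.Set (Int × Int)),
            ∀ i ∈ PySem.List.pyRange 0 ((t.length : Int) - 1),
            (fun examples i =>
              List.foldl
                (fun examples j =>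
                  List.foldl
                    (fun examples element1 =>
                      List.foldl (fun examples element2 => PySem.Set.add examples (element2, element1)) examples
                        (PySem.List.pyGetD (h :: t) j []))
                    examples (PySem.List.pyGetD (h :: t) i []))
                examples (PySem.List.pyRange (i + 1) (PySem.List.len (h :: t)))) acc (i + 1)
            = (fun examples i =>
                let base_group := PySem.List.pyGetD t i [];
                List.foldl
                  (fun examples j =>
                    let other_group := PySem.List.pyGetD t j [];
                    List.foldl
                      (fun examples element1 =>
                        List.foldl (fun examples element2 => examples.add (element2, element1)) examples
                          other_group)
                      examples base_group)
                  examples (PySem.List.pyRange (i + 1) (PySem.List.len t))) acc i := by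
          intro acc i hi
          have hi0 : 0 ≤ i := (PySem.List.mem_pyRange_one.mp hi).1
          simp only
          rw [pv_getD_cons_succ _ _ _ _ hi0, hlc, pv_foldl_pyRange_shift]
          refine PySem.List.foldl_congr_mem _ _ _ _ ?_
          intro ex j hj
          have hj0 : 0 ≤ j := by
            have := (PySem.List.mem_pyRange_one.mp hj).1; omega
          rw [pv_getD_cons_succ _ _ _ _ hj0]
        rw [PySem.List.foldl_congr_mem _ _ _ _ hcong, ← hlent]
        rw [ih]
        rw [show pvGen (h :: t) = pvBlock h t ++ pvGen t from rfl, PySem.Set.update_append]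

theorem pv_A_eq (order : List (List Int)) :
    get_follows_examples order = PySem.Set.ofList (pvGen order) := by
  unfold get_follows_examples
  rw [pv_A_loop]
  exact PySem.Set.update_nil_left _

theorem pv_update_ofList {α : Type} [BEq α] [LawfulBEq α] (s : PySem.Set α) (xs : List α) :
    s.update (PySem.Set.ofList xs) = s.update xs := by
  rw [PySem.Set.update_eq_append_filter, PySem.Set.update_eq_append_filter, PySem.Set.ofList_ofList]

theorem pv_B_state (order : List (List Int)) :
    order.foldr
      (fun head st =>
        (PySem.Set.union
           (PySem.Set.ofList
             (st.2.flatMap (fun g => head.flatMap (fun e1 => g.map (fun e2 => (e2, e1))))))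
           st.1,
         head :: st.2))
      (PySem.Set.empty, ([] : List (List Int)))
      = (PySem.Set.ofList (pvGen order), order) := by
  induction order with
  | nil => rfl
  | cons h t ih =>
      rw [List.foldr_cons, ih]
      simp only [pvGen, PySem.Set.union, PySem.Set.ofList_append, pvBlock, pv_update_ofList]

theorem pv_B_eq (order : List (List Int)) :
    get_follows_examples_alt order = PySem.Set.ofList (pvGen order) := by
  unfold get_follows_examples_alt
  rw [List.foldl_reverse]
  rw [show (fun (x : List Int) (y : PySem.Set (Int × Int) × List (List Int)) =>
        (PySem.Set.union
           (PySem.Set.ofList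
             (y.2.flatMap (fun g => x.flatMap (fun e1 => g.map (fun e2 => (e2, e1))))))
           y.1,
         x :: y.2)) = (fun head st =>
        (PySem.Set.union
           (PySem.Set.ofList
             (st.2.flatMap (fun g => head.flatMap (fun e1 => g.map (fun e2 => (e2, e1))))))
           st.1,
         head :: st.2)) from rfl]
  rw [pv_B_state]

-- ===== VERDICT (by name: the statement is the Claim_ definition above) =====
theorem get_follows_examples_spec : Claim_equal_get_follows_examples := by
  intro order _
  unfold Spec_get_follows_examples
  rw [pv_A_eq, pv_B_eq]
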